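-- pv_equiv track=rewrite | github.com/mikhailchizhmar/Algorithms_Yandex | hw5/C_RSQ_tourism.py | prefix_sums
-- ===== SOURCE A (Python) =====
-- def prefix_sums(arr):
--     ascent_sums = [0] * len(arr)
--     descent_sums = [0] * len(arr)
--     for i in range(1, len(arr)):
--         diff = arr[i][1] - arr[i - 1][1]
--         if diff >= 0:
--             ascent_sums[i] = ascent_sums[i - 1] + diff
--             descent_sums[i] = descent_sums[i - 1]
--         else:
--             descent_sums[i] = descent_sums[i - 1] - diff
--             ascent_sums[i] = ascent_sums[i - 1]
--
--     return ascent_sums, descent_sums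
-- ===== SOURCE B (Python) =====
-- def prefix_sums(arr):
--     # Total-variation method: keep one running sum tv of |height steps| and
--     # recover both outputs arithmetically from max(d,0) = (|d| + d) / 2:
--     # ascent_i = (tv_i + h_i - h_0) // 2, descent_i = (tv_i - h_i + h_0) // 2.
--     if not arr:
--         return [], []
--     h0 = arr[0][1]
--     tv = 0
--     prev = h0
--     asc, desc = [], []
--     for _, h in arr:
--         tv += abs(h - prev)
--         asc.append((tv + h - h0) // 2)
--         desc.append((tv - h + h0) // 2)
--         prev = h
--     return asc, desc
-- ===== Notes on version B (the rewrite author's own statement) =====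
-- stated objective: alternative
-- what changed: B replaces A's two separately-updated prefix arrays by a single running total-variation accumulator tv = sum of |height steps| and recovers both prefix sums arithmetically from the identity max(d,0) = (|d|+d)/2: ascent_i = (tv_i + h_i - h_0)//2, descent_i = (tv_i - h_i + h_0)//2.
import Mathlib
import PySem

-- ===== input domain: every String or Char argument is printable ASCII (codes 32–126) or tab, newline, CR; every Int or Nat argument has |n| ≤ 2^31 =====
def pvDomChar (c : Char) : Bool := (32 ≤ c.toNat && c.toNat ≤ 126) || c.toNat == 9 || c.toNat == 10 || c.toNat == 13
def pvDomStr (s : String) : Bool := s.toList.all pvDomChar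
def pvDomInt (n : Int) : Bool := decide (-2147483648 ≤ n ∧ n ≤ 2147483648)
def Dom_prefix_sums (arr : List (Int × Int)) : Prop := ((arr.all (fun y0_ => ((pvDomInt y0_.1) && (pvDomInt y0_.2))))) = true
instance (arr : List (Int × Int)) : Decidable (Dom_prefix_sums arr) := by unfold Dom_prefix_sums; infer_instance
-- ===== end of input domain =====

-- B replaces A's two separately-updated prefix arrays by one running total-variation
-- accumulator and derives both outputs arithmetically via max(d,0) = (|d|+d)/2.

-- ===== PORT A =====
-- Literal port of A: preallocate two zero arrays, loop i over range(1, len(arr)),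
-- write ascent_sums[i]/descent_sums[i] from the i-1 entries.
def prefix_sums (arr : List (Int × Int)) : List Int × List Int :=
  (PySem.List.pyRange 1 (arr.length : Int) 1).foldl
    (fun (st : List Int × List Int) i =>
      let diff := (PySem.List.pyGetD arr i (0,0)).2 - (PySem.List.pyGetD arr (i-1) (0,0)).2
      if diff ≥ 0 then
        (PySem.List.pySetD st.1 i (PySem.List.pyGetD st.1 (i-1) 0 + diff),
         PySem.List.pySetD st.2 i (PySem.List.pyGetD st.2 (i-1) 0))
      else
        (PySem.List.pySetD st.1 i (PySem.List.pyGetD st.1 (i-1) 0),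
         PySem.List.pySetD st.2 i (PySem.List.pyGetD st.2 (i-1) 0 - diff)))
    (List.replicate arr.length 0, List.replicate arr.length 0)

-- ===== PORT B =====
-- Literal port of B: one loop over arr carrying (tv, prev, asc, desc); each step
-- adds |h - prev| to tv and appends (tv + h - h0) // 2 and (tv - h + h0) // 2.
def prefix_sums_alt (arr : List (Int × Int)) : List Int × List Int :=
  match arr with
  | [] => ([], [])
  | a0 :: _ =>
    let h0 := a0.2
    let st := arr.foldl
      (fun (st : Int × Int × List Int × List Int) p =>
        let h := p.2
        let tv := st.1 + |h - st.2.1|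
        (tv, h,
         st.2.2.1 ++ [PySem.Int.floordiv (tv + h - h0) 2],
         st.2.2.2 ++ [PySem.Int.floordiv (tv - h + h0) 2]))
      (0, h0, [], [])
    (st.2.2.1, st.2.2.2)

-- ===== PRECONDITION & SPEC =====
def Spec_prefix_sums (arr : List (Int × Int)) (out : List Int × List Int) : Prop := out = prefix_sums_alt arr
instance (arr : List (Int × Int)) (out : List Int × List Int) : Decidable (Spec_prefix_sums arr out) := by unfold Spec_prefix_sums; infer_instance

-- ===== CLAIM (what is proved, stated in full; the proofs are below) =====
def Claim_equal_prefix_sums : Prop := ∀ (arr : List (Int × Int)), Dom_prefix_sums arr → Spec_prefix_sums arr (prefix_sums arr)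

-- ===== LEMMAS AND PROOFS =====

-- running sums (shared normal form both ports are reduced to)
def pvAccumulate : Int → List Int → List Int
  | _, [] => []
  | acc, x :: xs => (acc + x) :: pvAccumulate (acc + x) xs

-- per-step ascent/descent contributions along a height list starting from prev
def pvUps : Int → List Int → List Int
  | _, [] => []
  | p, h :: t => max (h - p) 0 :: pvUps h t

def pvDowns : Int → List Int → List Int
  | _, [] => []
  | p, h :: t => max (p - h) 0 :: pvDowns h t

theorem pvAccumulate_length (a : Int) (xs : List Int) : (pvAccumulate a xs).length = xs.length := by
  induction xs generalizing a with
  | nil => rfl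
  | cons x xs ih => simp [pvAccumulate, ih]

theorem pvAccumulate_snoc (a : Int) (xs : List Int) (y : Int) :
    pvAccumulate a (xs ++ [y]) = pvAccumulate a xs ++ [a + xs.sum + y] := by
  induction xs generalizing a with
  | nil => simp [pvAccumulate]
  | cons x xs ih => simp [pvAccumulate, ih]; ring_nf

theorem pvAccumulate_getD_last (a : Int) (xs : List Int) :
    (a :: pvAccumulate a xs).getD xs.length 0 = a + xs.sum := by
  induction xs generalizing a with
  | nil => simp
  | cons x xs ih =>
    simpa [pvAccumulate, List.getD, add_assoc] using ih (a + x)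

theorem set_append_len {α : Type} (xs ys : List α) (v : α) :
    (xs ++ ys).set xs.length v = xs ++ ys.set 0 v := by
  induction xs with
  | nil => rfl
  | cons x xs ih => simp [ih]

-- A-side loop invariant: after processing indices 1..m, both arrays hold the first m+1
-- prefix sums followed by zeros
theorem prefix_sums_invariant (arr : List (Int × Int)) (m : Nat)
    (hm : m + 1 ≤ arr.length) :
    (PySem.List.pyRange 1 (1 + (m : Int)) 1).foldl
      (fun (st : List Int × List Int) i =>
        let diff := (PySem.List.pyGetD arr i (0,0)).2 - (PySem.List.pyGetD arr (i-1) (0,0)).2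
        if diff ≥ 0 then
          (PySem.List.pySetD st.1 i (PySem.List.pyGetD st.1 (i-1) 0 + diff),
           PySem.List.pySetD st.2 i (PySem.List.pyGetD st.2 (i-1) 0))
        else
          (PySem.List.pySetD st.1 i (PySem.List.pyGetD st.1 (i-1) 0),
           PySem.List.pySetD st.2 i (PySem.List.pyGetD st.2 (i-1) 0 - diff)))
      (List.replicate arr.length 0, List.replicate arr.length 0)
    = (0 :: pvAccumulate 0 (((arr.zip (arr.drop 1)).map (fun p => max (p.2.2 - p.1.2) 0)).take m)
          ++ List.replicate (arr.length - 1 - m) 0,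
       0 :: pvAccumulate 0 (((arr.zip (arr.drop 1)).map (fun p => max (p.1.2 - p.2.2) 0)).take m)
          ++ List.replicate (arr.length - 1 - m) 0) := by
  induction m with
  | zero =>
    rw [PySem.List.pyRange_one_eq_nil (by omega)]
    obtain ⟨k, hk⟩ : ∃ k, arr.length = k + 1 := ⟨arr.length - 1, by omega⟩
    rw [hk]
    simp [pvAccumulate, List.replicate_succ]
  | succ m ih =>
    have hlen : (arr.zip (arr.drop 1)).length = arr.length - 1 := by
      simp [List.length_zip]
    have hm1 : m + 1 < arr.length := by omega
    have hm2 : m < arr.length - 1 := by omega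
    have hrange : PySem.List.pyRange 1 (1 + ((m:Int) + 1)) 1
        = PySem.List.pyRange 1 (1 + (m:Int)) 1 ++ [1 + (m:Int)] := by
      have := PySem.List.pyRange_one_succ_right (a := 1) (b := 1 + (m:Int)) (by omega)
      rw [← this]; ring_nf
    have hpair : (arr.zip (arr.drop 1))[m]'(by omega) = (arr[m]'(by omega), arr[m+1]'hm1) := by
      simp [List.getElem_zip]
    have hup : ((arr.zip (arr.drop 1)).map (fun p => max (p.2.2 - p.1.2) 0)).take (m+1)
        = ((arr.zip (arr.drop 1)).map (fun p => max (p.2.2 - p.1.2) 0)).take m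
          ++ [max ((arr[m+1]'hm1).2 - (arr[m]'(by omega)).2) 0] := by
      rw [List.take_add_one]
      congr 1
      rw [List.getElem?_eq_getElem (by simpa [hlen] using hm2)]
      simp
    have hdown : ((arr.zip (arr.drop 1)).map (fun p => max (p.1.2 - p.2.2) 0)).take (m+1)
        = ((arr.zip (arr.drop 1)).map (fun p => max (p.1.2 - p.2.2) 0)).take m
          ++ [max ((arr[m]'(by omega)).2 - (arr[m+1]'hm1).2) 0] := by
      rw [List.take_add_one]
      congr 1
      rw [List.getElem?_eq_getElem (by simpa [hlen] using hm2)]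
      simp
    push_cast
    rw [hrange, List.foldl_append, ih (by omega)]
    simp only [List.foldl_cons, List.foldl_nil]
    set up := (arr.zip (arr.drop 1)).map (fun p => max (p.2.2 - p.1.2) 0) with hupdef
    set down := (arr.zip (arr.drop 1)).map (fun p => max (p.1.2 - p.2.2) 0) with hdowndef
    have hlup : (up.take m).length = m := by
      simp [hupdef]; omega
    have hldown : (down.take m).length = m := by
      simp [hdowndef]; omega
    have hread : ∀ (xs : List Int), xs.length = m →
        (0 :: pvAccumulate 0 xs ++ List.replicate (arr.length - 1 - m) 0).getD m 0 = xs.sum := by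
      intro xs hxs
      rw [show (0 :: pvAccumulate 0 xs ++ List.replicate (arr.length - 1 - m) 0)
            = (0 :: pvAccumulate 0 xs) ++ List.replicate (arr.length - 1 - m) 0 from rfl]
      rw [List.getD_append _ _ _ _ (by simp [pvAccumulate_length, hxs])]
      have := pvAccumulate_getD_last 0 xs
      rw [hxs] at this
      simpa using this
    have hset : ∀ (xs : List Int) (v : Int), xs.length = m →
        (0 :: pvAccumulate 0 xs ++ List.replicate (arr.length - 1 - m) 0).set (m+1) v
        = 0 :: pvAccumulate 0 xs ++ (v :: List.replicate (arr.length - 1 - (m+1)) 0) := by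
      intro xs v hxs
      have h1 : (0 :: pvAccumulate 0 xs).length = m + 1 := by
        simp [pvAccumulate_length, hxs]
      rw [show (0 :: pvAccumulate 0 xs ++ List.replicate (arr.length - 1 - m) 0)
            = (0 :: pvAccumulate 0 xs) ++ List.replicate (arr.length - 1 - m) 0 from rfl]
      rw [← h1, set_append_len]
      have h2 : arr.length - 1 - m = (arr.length - 1 - (m+1)) + 1 := by omega
      rw [h2, List.replicate_succ]
      simp [pvAccumulate_length, hxs]
    have hidx : (1:Int) + (m:Int) = ((m+1 : Nat) : Int) := by push_cast; ring
    have hidx2 : (((m+1 : Nat) : Int)) - 1 = ((m : Nat) : Int) := by push_cast; ring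
    simp only [hidx, hidx2, PySem.List.pySetD_natCast, PySem.List.pyGetD_natCast]
    rw [List.getD_eq_getElem arr _ hm1, List.getD_eq_getElem arr _ (show m < arr.length by omega)]
    have hmlt : m < arr.length := by omega
    by_cases hd : (arr[m+1]'hm1).2 - (arr[m]'hmlt).2 ≥ 0
    · rw [if_pos hd]
      rw [hread _ hlup, hread _ hldown, hset _ _ hlup, hset _ _ hldown,
        hup, hdown, pvAccumulate_snoc, pvAccumulate_snoc]
      have hmax1 : max ((arr[m+1]'hm1).2 - (arr[m]'hmlt).2) 0
          = (arr[m+1]'hm1).2 - (arr[m]'hmlt).2 := by omega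
      have hmax2 : max ((arr[m]'hmlt).2 - (arr[m+1]'hm1).2) 0 = 0 := by omega
      rw [hmax1, hmax2]
      simp only [Prod.mk.injEq]
      refine ⟨by simp, by simp⟩
    · rw [if_neg hd]
      rw [hread _ hlup, hread _ hldown, hset _ _ hlup, hset _ _ hldown,
        hup, hdown, pvAccumulate_snoc, pvAccumulate_snoc]
      have hmax1 : max ((arr[m+1]'hm1).2 - (arr[m]'hmlt).2) 0 = 0 := by omega
      have hmax2 : max ((arr[m]'hmlt).2 - (arr[m+1]'hm1).2) 0
          = (arr[m]'hmlt).2 - (arr[m+1]'hm1).2 := by omega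
      rw [hmax1, hmax2]
      simp only [Prod.mk.injEq]
      refine ⟨by simp, by simp; ring_nf⟩

-- exact halving of an even number under Python floor division
theorem floordiv_two_mul (k : Int) : PySem.Int.floordiv (2 * k) 2 = k := by
  rw [PySem.Int.floordiv_eq_ediv_of_pos (by omega)]
  omega

-- the map over zip in the A-side normal form is pvUps / pvDowns over the heights
theorem zip_map_eq_pvUps (a : Int × Int) (rest : List (Int × Int)) :
    ((a :: rest).zip rest).map (fun p => max (p.2.2 - p.1.2) 0)
      = pvUps a.2 (rest.map (fun p => p.2)) := by
  induction rest generalizing a with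
  | nil => rfl
  | cons b t ih => simp [pvUps, ih b]

theorem zip_map_eq_pvDowns (a : Int × Int) (rest : List (Int × Int)) :
    ((a :: rest).zip rest).map (fun p => max (p.1.2 - p.2.2) 0)
      = pvDowns a.2 (rest.map (fun p => p.2)) := by
  induction rest generalizing a with
  | nil => rfl
  | cons b t ih => simp [pvDowns, ih b]

-- B-side loop invariant: with tv = ascTotal + descTotal and prev = h0 + ascTotal - descTotal,
-- the fold appends exactly the accumulated ups/downs
theorem alt_loop_invariant (h0 : Int) (rest : List (Int × Int)) :
    ∀ (aS dS : Int) (asc desc : List Int),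
    (rest.foldl
      (fun (st : Int × Int × List Int × List Int) p =>
        let h := p.2
        let tv := st.1 + |h - st.2.1|
        (tv, h,
         st.2.2.1 ++ [PySem.Int.floordiv (tv + h - h0) 2],
         st.2.2.2 ++ [PySem.Int.floordiv (tv - h + h0) 2]))
      (aS + dS, h0 + aS - dS, asc, desc)).2.2
    = (asc ++ pvAccumulate aS (pvUps (h0 + aS - dS) (rest.map (fun p => p.2))),
       desc ++ pvAccumulate dS (pvDowns (h0 + aS - dS) (rest.map (fun p => p.2)))) := by
  induction rest with
  | nil => intro aS dS asc desc; simp [pvUps, pvDowns, pvAccumulate]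
  | cons p t ih =>
    intro aS dS asc desc
    simp only [List.foldl_cons, List.map_cons, pvUps, pvDowns, pvAccumulate]
    have habs : |p.2 - (h0 + aS - dS)|
        = max (p.2 - (h0 + aS - dS)) 0 + max ((h0 + aS - dS) - p.2) 0 := by
      rcases le_total (h0 + aS - dS) p.2 with h | h
      · rw [abs_of_nonneg (by omega)]; omega
      · rw [abs_of_nonpos (by omega)]; omega
    set u := max (p.2 - (h0 + aS - dS)) 0 with hu
    set d := max ((h0 + aS - dS) - p.2) 0 with hd
    have hud : p.2 - (h0 + aS - dS) = u - d := by
      rcases le_total (h0 + aS - dS) p.2 with h | h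
      · simp [hu, hd]; omega
      · simp [hu, hd]; omega
    have hstate1 : aS + dS + |p.2 - (h0 + aS - dS)| = (aS + u) + (dS + d) := by
      rw [habs]; ring
    have hstate2 : p.2 = h0 + (aS + u) - (dS + d) := by omega
    have hfd1 : PySem.Int.floordiv (aS + dS + |p.2 - (h0 + aS - dS)| + p.2 - h0) 2 = aS + u := by
      have : aS + dS + |p.2 - (h0 + aS - dS)| + p.2 - h0 = 2 * (aS + u) := by
        rw [habs]; omega
      rw [this, floordiv_two_mul]
    have hfd2 : PySem.Int.floordiv (aS + dS + |p.2 - (h0 + aS - dS)| - p.2 + h0) 2 = dS + d := by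
      have : aS + dS + |p.2 - (h0 + aS - dS)| - p.2 + h0 = 2 * (dS + d) := by
        rw [habs]; omega
      rw [this, floordiv_two_mul]
    rw [hfd1, hfd2, hstate1]
    rw [show p.2 = h0 + (aS + u) - (dS + d) from hstate2]
    rw [ih (aS + u) (dS + d) (asc ++ [aS + u]) (desc ++ [dS + d])]
    simp [hu, hd]

-- ===== VERDICT (by name: the statement is the Claim_ definition above) =====
theorem prefix_sums_spec : Claim_equal_prefix_sums := by
  intro arr _
  unfold Spec_prefix_sums
  cases arr with
  | nil => rfl
  | cons a rest =>
    have hA := prefix_sums_invariant (a :: rest) rest.length (by simp)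
    unfold prefix_sums prefix_sums_alt
    have hN : (((a :: rest).length : Nat) : Int) = 1 + (rest.length : Int) := by
      push_cast [List.length_cons]; ring
    rw [hN, hA]
    have ht1 : (((a :: rest).zip ((a :: rest).drop 1)).map (fun p => max (p.2.2 - p.1.2) 0)).take rest.length
        = ((a :: rest).zip ((a :: rest).drop 1)).map (fun p => max (p.2.2 - p.1.2) 0) :=
      List.take_of_length_le (by simp)
    have ht2 : (((a :: rest).zip ((a :: rest).drop 1)).map (fun p => max (p.1.2 - p.2.2) 0)).take rest.length
        = ((a :: rest).zip ((a :: rest).drop 1)).map (fun p => max (p.1.2 - p.2.2) 0) :=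
      List.take_of_length_le (by simp)
    rw [ht1, ht2]
    -- B side: the first iteration produces state (0, a.2, [0], [0]); then the loop invariant
    simp only [List.foldl_cons, sub_self, abs_zero, add_zero, List.nil_append]
    have hz1 : PySem.Int.floordiv ((0:Int) + a.2 - a.2) 2 = 0 := by
      rw [show (0:Int) + a.2 - a.2 = 2 * 0 by ring]; exact floordiv_two_mul 0
    have hz2 : PySem.Int.floordiv ((0:Int) - a.2 + a.2) 2 = 0 := by
      rw [show (0:Int) - a.2 + a.2 = 2 * 0 by ring]; exact floordiv_two_mul 0
    rw [hz1, hz2, Prod.mk.eta]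
    have hB := alt_loop_invariant a.2 rest 0 0 [0] [0]
    simp only [add_zero, sub_zero, List.singleton_append] at hB
    rw [hB]
    simp [zip_map_eq_pvUps, zip_map_eq_pvDowns]
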